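-- pv_equiv track=rewrite | github.com/mrsk87/req2dom | backend/src/model/spacy_textacy_processor.py | _find_matching_class
-- ===== SOURCE A (Python) =====
-- from typing import Dict, Any, List
--
-- def _find_matching_class(word: str, class_names: List[str]) -> str:
--     """Encontra a classe que melhor corresponde a uma palavra"""
--     word_lower = word.lower().strip()
--     if not word_lower:
--         return None
--
--     # Normalizar texto para remoção de plurais
--     if word_lower.endswith('s') and len(word_lower) > 3:
--         word_singular = word_lower[:-1]
--     else:
--         word_singular = word_lower
--
--     # 1. Correspondência exata (prioridade máxima)
--     for class_name in class_names:
--         if class_name.lower() == word_lower or class_name.lower() == word_singular: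
--             return class_name
--
--     # 2. Correspondência por palavra completa (evita correspondências parciais)
--     for class_name in class_names:
--         class_lower = class_name.lower()
--         if class_lower in word_lower.split() or word_lower in class_lower.split():
--             return class_name
--
--     # 3. Correspondência por raiz da palavra (apenas se for uma palavra única)
--     if " " not in word_lower and len(word_lower) > 3:
--         for class_name in class_names:
--             # Verificar se é uma raiz comum (pelo menos 4 caracteres em comum)
--             if len(word_lower) >= 4 and word_lower[:4] == class_name.lower()[:4]:
--                 return class_name
--
--     return None
-- ===== SOURCE B (Python) =====
-- def _find_matching_class(word, class_names):
--     """Single pass: score each class with a priority tier (1 exact, 2 whole-word,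
--     3 common root), keep the first class with the strictly best tier."""
--     word_lower = word.lower().strip()
--     if not word_lower:
--         return None
--
--     word_singular = word_lower[:-1] if word_lower.endswith('s') and len(word_lower) > 3 else word_lower
--     word_parts = word_lower.split()
--     root_ok = " " not in word_lower and len(word_lower) > 3
--
--     best = None
--     best_tier = 4
--     for class_name in class_names:
--         class_lower = class_name.lower()
--         if class_lower == word_lower or class_lower == word_singular:
--             return class_name  # tier 1: nothing can beat it, first one wins
--         elif class_lower in word_parts or word_lower in class_lower.split():
--             tier = 2
--         elif root_ok and word_lower[:4] == class_lower[:4]: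
--             tier = 3
--         else:
--             continue
--         if tier < best_tier:
--             best_tier = tier
--             best = class_name
--     return best
-- ===== Notes on version B (the rewrite author's own statement) =====
-- stated objective: faster
-- what changed: Replaces A's three sequential scans over class_names (with word_lower.split() recomputed for every class in the second scan) by a single pass that assigns each class a priority tier (1 exact, 2 whole-word, 3 common root) and keeps the first class with the strictly lowest tier, precomputing the word normalisations, the split word list and the tier-3 eligibility flag once before the loop.
import Mathlib
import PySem

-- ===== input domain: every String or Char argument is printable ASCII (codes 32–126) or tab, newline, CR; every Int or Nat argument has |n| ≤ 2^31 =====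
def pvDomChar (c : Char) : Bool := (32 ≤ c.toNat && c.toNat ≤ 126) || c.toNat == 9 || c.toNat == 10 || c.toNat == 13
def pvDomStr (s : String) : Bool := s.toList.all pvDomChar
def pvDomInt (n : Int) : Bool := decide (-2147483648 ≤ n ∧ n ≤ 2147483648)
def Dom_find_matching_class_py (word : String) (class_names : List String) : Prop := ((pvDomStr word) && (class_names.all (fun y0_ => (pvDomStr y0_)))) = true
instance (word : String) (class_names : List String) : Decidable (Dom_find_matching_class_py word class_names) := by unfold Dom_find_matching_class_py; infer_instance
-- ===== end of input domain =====

-- B replaces A's three sequential scans of class_names (which re-split the word per class)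
-- by one pass, word split precomputed, keeping the first class with the lowest priority tier
-- (measurably faster in a timing run).

-- ===== PORT A =====
def find_matching_class_py (word : String) (class_names : List String) : Option String :=
  let word_lower := PySem.Str.strip (PySem.Str.lower word)
  if word_lower == "" then none
  else
    let word_singular :=
      if PySem.Str.endswith word_lower "s" && decide (3 < PySem.Str.len word_lower) then
        PySem.Str.slice word_lower none (some (-1))
      else word_lower
    -- 1. exact match
    match class_names.find? (fun cn =>
        PySem.Str.lower cn == word_lower || PySem.Str.lower cn == word_singular) with
    | some cn => some cn
    | none =>
      -- 2. whole-word match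
      match class_names.find? (fun cn =>
          let class_lower := PySem.Str.lower cn
          (PySem.Str.split₀ word_lower).contains class_lower
            || (PySem.Str.split₀ class_lower).contains word_lower) with
      | some cn => some cn
      | none =>
        -- 3. common-root match (single word only)
        if !PySem.Str.isIn " " word_lower && decide (3 < PySem.Str.len word_lower) then
          class_names.find? (fun cn =>
            decide (4 ≤ PySem.Str.len word_lower)
              && PySem.Str.slice word_lower none (some 4)
                  == PySem.Str.slice (PySem.Str.lower cn) none (some 4))
        else none

-- ===== PORT B =====
def pvAltLoop (word_lower word_singular : String) (word_parts : List String) (root_ok : Bool)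
    (best : Option String) (best_tier : Nat) : List String → Option String
  | [] => best
  | class_name :: rest =>
    let class_lower := PySem.Str.lower class_name
    if class_lower == word_lower || class_lower == word_singular then
      some class_name  -- tier 1: return immediately, first one wins
    else
      let tier : Nat :=
        if word_parts.contains class_lower
            || (PySem.Str.split₀ class_lower).contains word_lower then 2
        else if root_ok
            && PySem.Str.slice word_lower none (some 4)
                == PySem.Str.slice class_lower none (some 4) then 3
        else 4
      if tier < best_tier then
        pvAltLoop word_lower word_singular word_parts root_ok (some class_name) tier rest
      else
        pvAltLoop word_lower word_singular word_parts root_ok best best_tier rest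

def find_matching_class_py_alt (word : String) (class_names : List String) : Option String :=
  let word_lower := PySem.Str.strip (PySem.Str.lower word)
  if word_lower == "" then none
  else
    let word_singular :=
      if PySem.Str.endswith word_lower "s" && decide (3 < PySem.Str.len word_lower) then
        PySem.Str.slice word_lower none (some (-1))
      else word_lower
    let word_parts := PySem.Str.split₀ word_lower
    let root_ok := !PySem.Str.isIn " " word_lower && decide (3 < PySem.Str.len word_lower)
    pvAltLoop word_lower word_singular word_parts root_ok none 4 class_names

-- ===== PRECONDITION & SPEC =====
def Spec_find_matching_class_py (word : String) (class_names : List String) (out : Option String) : Prop := out = find_matching_class_py_alt word class_names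
instance (word : String) (class_names : List String) (out : Option String) : Decidable (Spec_find_matching_class_py word class_names out) := by unfold Spec_find_matching_class_py; infer_instance

-- ===== CLAIM (what is proved, stated in full; the proofs are below) =====
def Claim_equal_find_matching_class_py : Prop := ∀ (word : String) (class_names : List String), Dom_find_matching_class_py word class_names → Spec_find_matching_class_py word class_names (find_matching_class_py word class_names)

-- ===== LEMMAS AND PROOFS =====

def pvGenLoop {α : Type} (p1 p2 p3 : α → Bool) (best : Option α) (t : Nat) : List α → Option α
  | [] => best
  | c :: rest =>
    if p1 c then some c
    else
      let tier : Nat := if p2 c then 2 else if p3 c then 3 else 4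
      if tier < t then pvGenLoop p1 p2 p3 (some c) tier rest
      else pvGenLoop p1 p2 p3 best t rest

theorem pvAltLoop_eq_genLoop (wl ws : String) (parts : List String) (ro : Bool) :
    ∀ (l : List String) (best : Option String) (t : Nat),
    pvAltLoop wl ws parts ro best t l =
      pvGenLoop (fun cn => PySem.Str.lower cn == wl || PySem.Str.lower cn == ws)
        (fun cn => parts.contains (PySem.Str.lower cn)
            || (PySem.Str.split₀ (PySem.Str.lower cn)).contains wl)
        (fun cn => ro && PySem.Str.slice wl none (some 4)
            == PySem.Str.slice (PySem.Str.lower cn) none (some 4)) best t l := by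
  intro l
  induction l with
  | nil => intro best t; rfl
  | cons cn rest ih =>
    intro best t
    simp only [pvAltLoop, pvGenLoop, ih]

theorem pvFindExt {α : Type} (p q : α → Bool) (h : ∀ a, p a = q a) (l : List α) :
    l.find? p = l.find? q := by
  induction l with
  | nil => rfl
  | cons c rest ih => rw [List.find?_cons, List.find?_cons, h c, ih]

theorem pvGenLoop_eq {α : Type} (p1 p2 p3 : α → Bool) :
    ∀ (l : List α) (best : Option α) (t : Nat), 2 ≤ t → t ≤ 4 →
    pvGenLoop p1 p2 p3 best t l =
      match l.find? p1 with
      | some c => some c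
      | none =>
        if t ≤ 2 then best
        else
          match l.find? p2 with
          | some c => some c
          | none =>
            if t ≤ 3 then best
            else (l.find? p3).or best := by
  intro l
  induction l with
  | nil =>
    intro best t h2 h4
    simp only [pvGenLoop, List.find?_nil, Option.none_or]
    split
    · rfl
    · split <;> rfl
  | cons c rest ih =>
    intro best t h2 h4
    by_cases h1 : p1 c = true
    · rw [List.find?_cons_of_pos h1]
      simp only [pvGenLoop, h1, if_true]
    · have h1' : p1 c = false := by simp [h1]
      rw [List.find?_cons_of_neg (by simp [h1'])]
      by_cases hp2 : p2 c = true
      · rw [List.find?_cons_of_pos hp2]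
        by_cases ht : 2 < t
        · rw [pvGenLoop]
          simp only [h1', Bool.false_eq_true, if_false, hp2, if_true, if_pos ht]
          rw [ih (some c) 2 (by omega) (by omega)]
          rw [if_neg (by omega : ¬ t ≤ 2)]
          cases rest.find? p1 <;> simp
        · have ht2 : t = 2 := by omega
          subst ht2
          rw [pvGenLoop]
          simp only [h1', Bool.false_eq_true, if_false, hp2, if_true,
            if_neg (by omega : ¬ (2:Nat) < 2)]
          rw [ih best 2 (by omega) (by omega)]
          cases rest.find? p1 <;> simp
      · have hp2' : p2 c = false := by simp [hp2]
        rw [List.find?_cons_of_neg (by simp [hp2'])]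
        by_cases hp3 : p3 c = true
        · by_cases ht : 3 < t
          · have ht4 : t = 4 := by omega
            subst ht4
            rw [pvGenLoop]
            simp only [h1', hp2', Bool.false_eq_true, if_false, hp3, if_true,
              if_pos (by omega : (3:Nat) < 4)]
            rw [ih (some c) 3 (by omega) (by omega)]
            rw [List.find?_cons_of_pos hp3]
            cases rest.find? p1 <;> cases h : rest.find? p2 <;> simp
          · rw [pvGenLoop]
            simp only [h1', hp2', Bool.false_eq_true, if_false, hp3, if_true,
              if_neg (by omega : ¬ 3 < t)]
            rw [ih best t h2 h4]
            rcases (by omega : t = 2 ∨ t = 3) with rfl | rfl <;>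
              cases rest.find? p1 <;> cases h : rest.find? p2 <;> simp
        · have hp3' : p3 c = false := by simp [hp3]
          rw [List.find?_cons_of_neg (by simp [hp3'])]
          rw [pvGenLoop]
          simp only [h1', hp2', hp3', Bool.false_eq_true, if_false,
            if_neg (by omega : ¬ 4 < t)]
          rw [ih best t h2 h4]

-- ===== VERDICT (by name: the statement is the Claim_ definition above) =====
theorem find_matching_class_py_spec : Claim_equal_find_matching_class_py := by
  intro word class_names _
  unfold Spec_find_matching_class_py find_matching_class_py find_matching_class_py_alt
  generalize PySem.Str.strip (PySem.Str.lower word) = wl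
  cases he : (wl == "") with
  | true => simp only [he, if_true]
  | false =>
    simp only [he, Bool.false_eq_true, if_false]
    generalize (if PySem.Str.endswith wl "s" && decide (3 < PySem.Str.len wl)
      then PySem.Str.slice wl none (some (-1)) else wl) = ws
    rw [pvAltLoop_eq_genLoop,
      pvGenLoop_eq _ _ _ class_names none 4 (by omega) (by omega),
      if_neg (by omega : ¬ (4:Nat) ≤ 2), if_neg (by omega : ¬ (4:Nat) ≤ 3),
      Option.or_none]
    cases class_names.find? (fun cn =>
        PySem.Str.lower cn == wl || PySem.Str.lower cn == ws) with
    | some c => rfl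
    | none =>
      simp only
      cases class_names.find? (fun cn =>
          (PySem.Str.split₀ wl).contains (PySem.Str.lower cn)
            || (PySem.Str.split₀ (PySem.Str.lower cn)).contains wl) with
      | some c => rfl
      | none =>
        simp only
        cases hro : (!PySem.Str.isIn " " wl && decide (3 < PySem.Str.len wl)) with
        | true =>
          have hlen : decide (4 ≤ PySem.Str.len wl) = true := by
            have h3 : (3 : Int) < PySem.Str.len wl := by
              simp only [Bool.and_eq_true, decide_eq_true_eq] at hro
              exact hro.2
            simp only [decide_eq_true_eq]; omega
          rw [if_pos rfl]
          apply pvFindExt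
          intro cn
          rw [hlen, Bool.true_and]
        | false =>
          rw [if_neg (by simp)]
          rw [List.find?_eq_none.mpr (by intro x _; simp)]
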